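-- pv_equiv track=rewrite | github.com/stephenlthorn/tidb-oracle | api/app/retrieval/tidb_docs.py | _heuristic_docs_urls
-- ===== SOURCE A (Python) =====
-- _DEFAULT_DOC_URLS = [
--     "https://docs.pingcap.com/tidb/stable/overview",
--     "https://docs.pingcap.com/tidb/stable/tidb-architecture",
--     "https://docs.pingcap.com/tidb/stable/mysql-compatibility",
-- ]
--
-- _KEYWORD_DOC_URLS = [
--     ("aurora", "https://docs.pingcap.com/tidb/stable/migrate-aurora-to-tidb"),
--     ("migration", "https://docs.pingcap.com/tidb/stable/migration-overview"),
--     ("ddl", "https://docs.pingcap.com/tidb/stable/mysql-compatibility"),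
--     ("storage", "https://docs.pingcap.com/tidb/stable/tidb-storage"),
--     ("architecture", "https://docs.pingcap.com/tidb/stable/tidb-architecture"),
--     ("security", "https://docs.pingcap.com/tidb/stable/best-practices-for-security-configuration"),
-- ]
--
-- def _heuristic_docs_urls(query: str) -> list[str]:
--     lowered = query.lower()
--     urls: list[str] = []
--     for keyword, url in _KEYWORD_DOC_URLS:
--         if keyword in lowered and url not in urls:
--             urls.append(url)
--     for url in _DEFAULT_DOC_URLS:
--         if url not in urls:
--             urls.append(url)
--     return urls
-- ===== SOURCE B (Python) =====
-- _DEFAULT_DOC_URLS = [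
--     "https://docs.pingcap.com/tidb/stable/overview",
--     "https://docs.pingcap.com/tidb/stable/tidb-architecture",
--     "https://docs.pingcap.com/tidb/stable/mysql-compatibility",
-- ]
--
-- _KEYWORD_DOC_URLS = [
--     ("aurora", "https://docs.pingcap.com/tidb/stable/migrate-aurora-to-tidb"),
--     ("migration", "https://docs.pingcap.com/tidb/stable/migration-overview"),
--     ("ddl", "https://docs.pingcap.com/tidb/stable/mysql-compatibility"),
--     ("storage", "https://docs.pingcap.com/tidb/stable/tidb-storage"),
--     ("architecture", "https://docs.pingcap.com/tidb/stable/tidb-architecture"),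
--     ("security", "https://docs.pingcap.com/tidb/stable/best-practices-for-security-configuration"),
-- ]
--
-- def _heuristic_docs_urls(query: str) -> list[str]:
--     # Assign each selected URL the index of its earliest occurrence in the virtual
--     # candidate sequence (matched keyword slots 0..5, then default slots 6..8),
--     # then emit the URLs sorted by that priority.  No sequential dedup at all.
--     lowered = query.lower()
--     n = len(_KEYWORD_DOC_URLS)
--     priority: dict[str, int] = {}
--     for j, url in enumerate(_DEFAULT_DOC_URLS):
--         if url not in priority:
--             priority[url] = n + j
--     for i, (kw, url) in enumerate(_KEYWORD_DOC_URLS):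
--         if kw in lowered and priority.get(url, n + len(_DEFAULT_DOC_URLS)) > i:
--             priority[url] = i
--     return [url for url, _ in sorted(priority.items(), key=lambda item: item[1])]
-- ===== Notes on version B (the rewrite author's own statement) =====
-- stated objective: alternative
-- what changed: Instead of A's two sequential dedup-on-insert loops, B assigns each selected URL a priority (the index of its earliest occurrence in the virtual candidate sequence: matched keyword slots 0..5, then default slots 6..8) via a min-keeping dict, and returns the URLs sorted by that priority; there is no sequential dedup pass.
import Mathlib
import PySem

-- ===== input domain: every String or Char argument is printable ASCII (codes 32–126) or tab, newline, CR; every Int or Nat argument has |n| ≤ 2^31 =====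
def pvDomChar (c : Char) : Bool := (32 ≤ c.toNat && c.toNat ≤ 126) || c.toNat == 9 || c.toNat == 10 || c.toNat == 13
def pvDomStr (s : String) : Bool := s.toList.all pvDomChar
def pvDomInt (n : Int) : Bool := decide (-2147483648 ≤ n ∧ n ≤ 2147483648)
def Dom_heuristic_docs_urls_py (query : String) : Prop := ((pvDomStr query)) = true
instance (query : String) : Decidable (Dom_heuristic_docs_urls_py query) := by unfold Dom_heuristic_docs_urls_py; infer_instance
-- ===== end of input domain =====

-- B replaces A's sequential dedup-on-insert loops by a priority map: each selected URL is
-- keyed by the index of its earliest occurrence in the virtual candidate sequence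
-- (keyword slots 0..5, default slots 6..8), and the output is the URLs sorted by that
-- priority — no sequential dedup pass at all; objective: alternative.

-- ===== PORT A =====
def pvDefaultDocUrls : List String :=
  [ "https://docs.pingcap.com/tidb/stable/overview",
    "https://docs.pingcap.com/tidb/stable/tidb-architecture",
    "https://docs.pingcap.com/tidb/stable/mysql-compatibility" ]

def pvKeywordDocUrls : List (String × String) :=
  [ ("aurora", "https://docs.pingcap.com/tidb/stable/migrate-aurora-to-tidb"),
    ("migration", "https://docs.pingcap.com/tidb/stable/migration-overview"),
    ("ddl", "https://docs.pingcap.com/tidb/stable/mysql-compatibility"),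
    ("storage", "https://docs.pingcap.com/tidb/stable/tidb-storage"),
    ("architecture", "https://docs.pingcap.com/tidb/stable/tidb-architecture"),
    ("security", "https://docs.pingcap.com/tidb/stable/best-practices-for-security-configuration") ]

def heuristic_docs_urls_py (query : String) : List String :=
  let lowered := PySem.Str.lower query
  let urls : List String :=
    pvKeywordDocUrls.foldl
      (fun urls p =>
        if PySem.Str.isIn p.1 lowered && !(urls.contains p.2) then urls ++ [p.2] else urls) []
  pvDefaultDocUrls.foldl
    (fun urls url => if !(urls.contains url) then urls ++ [url] else urls) urls

-- ===== PORT B =====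
def heuristic_docs_urls_py_alt (query : String) : List String :=
  let lowered := PySem.Str.lower query
  let n : Int := pvKeywordDocUrls.length
  let priority : PySem.Dict String Int :=
    (PySem.List.enumerate pvDefaultDocUrls).foldl
      (fun d p => if !(d.contains p.2) then d.insert p.2 (n + p.1) else d)
      PySem.Dict.empty
  let priority :=
    (PySem.List.enumerate pvKeywordDocUrls).foldl
      (fun d p =>
        if PySem.Str.isIn p.2.1 lowered
            && decide (p.1 < d.getD p.2.2 (n + (pvDefaultDocUrls.length : Int)))
        then d.insert p.2.2 p.1 else d)
      priority
  (PySem.List.sorted priority.items (fun item => item.2) false).map Prod.fst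

-- ===== PRECONDITION & SPEC =====
def Spec_heuristic_docs_urls_py (query : String) (out : List String) : Prop := out = heuristic_docs_urls_py_alt query
instance (query : String) (out : List String) : Decidable (Spec_heuristic_docs_urls_py query out) := by unfold Spec_heuristic_docs_urls_py; infer_instance

-- ===== CLAIM (what is proved, stated in full; the proofs are below) =====
def Claim_equal_heuristic_docs_urls_py : Prop := ∀ (query : String), Dom_heuristic_docs_urls_py query → Spec_heuristic_docs_urls_py query (heuristic_docs_urls_py query)

-- ===== LEMMAS AND PROOFS =====

-- Both programs depend on the query only through the six booleans 'keyword ∈ lowered'.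
-- pvACore / pvBCore are the two programs with those booleans abstracted out.
def pvACore (b0 b1 b2 b3 b4 b5 : Bool) : List String :=
  let urls : List String :=
    ([(b0, "https://docs.pingcap.com/tidb/stable/migrate-aurora-to-tidb"),
      (b1, "https://docs.pingcap.com/tidb/stable/migration-overview"),
      (b2, "https://docs.pingcap.com/tidb/stable/mysql-compatibility"),
      (b3, "https://docs.pingcap.com/tidb/stable/tidb-storage"),
      (b4, "https://docs.pingcap.com/tidb/stable/tidb-architecture"),
      (b5, "https://docs.pingcap.com/tidb/stable/best-practices-for-security-configuration")] :
        List (Bool × String)).foldl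
      (fun urls p => if p.1 && !(urls.contains p.2) then urls ++ [p.2] else urls) []
  pvDefaultDocUrls.foldl
    (fun urls url => if !(urls.contains url) then urls ++ [url] else urls) urls

def pvBCore (b0 b1 b2 b3 b4 b5 : Bool) : List String :=
  let n : Int := pvKeywordDocUrls.length
  let priority : PySem.Dict String Int :=
    (PySem.List.enumerate pvDefaultDocUrls).foldl
      (fun d p => if !(d.contains p.2) then d.insert p.2 (n + p.1) else d)
      PySem.Dict.empty
  let priority :=
    (PySem.List.enumerate
        ([(b0, "https://docs.pingcap.com/tidb/stable/migrate-aurora-to-tidb"),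
          (b1, "https://docs.pingcap.com/tidb/stable/migration-overview"),
          (b2, "https://docs.pingcap.com/tidb/stable/mysql-compatibility"),
          (b3, "https://docs.pingcap.com/tidb/stable/tidb-storage"),
          (b4, "https://docs.pingcap.com/tidb/stable/tidb-architecture"),
          (b5, "https://docs.pingcap.com/tidb/stable/best-practices-for-security-configuration")] :
            List (Bool × String))).foldl
      (fun d p =>
        if p.2.1 && decide (p.1 < d.getD p.2.2 (n + (pvDefaultDocUrls.length : Int)))
        then d.insert p.2.2 p.1 else d)
      priority
  (PySem.List.sorted priority.items (fun item => item.2) false).map Prod.fst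

set_option maxHeartbeats 2000000 in
theorem pvA_eq_core (query : String) :
    heuristic_docs_urls_py query
      = pvACore (PySem.Str.isIn "aurora" (PySem.Str.lower query))
          (PySem.Str.isIn "migration" (PySem.Str.lower query))
          (PySem.Str.isIn "ddl" (PySem.Str.lower query))
          (PySem.Str.isIn "storage" (PySem.Str.lower query))
          (PySem.Str.isIn "architecture" (PySem.Str.lower query))
          (PySem.Str.isIn "security" (PySem.Str.lower query)) := rfl

set_option maxHeartbeats 2000000 in
theorem pvB_eq_core (query : String) :
    heuristic_docs_urls_py_alt query
      = pvBCore (PySem.Str.isIn "aurora" (PySem.Str.lower query))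
          (PySem.Str.isIn "migration" (PySem.Str.lower query))
          (PySem.Str.isIn "ddl" (PySem.Str.lower query))
          (PySem.Str.isIn "storage" (PySem.Str.lower query))
          (PySem.Str.isIn "architecture" (PySem.Str.lower query))
          (PySem.Str.isIn "security" (PySem.Str.lower query)) := rfl

theorem pvCore_eq : ∀ b0 b1 b2 b3 b4 b5 : Bool,
    pvACore b0 b1 b2 b3 b4 b5 = pvBCore b0 b1 b2 b3 b4 b5 := by decide

-- ===== VERDICT (by name: the statement is the Claim_ definition above) =====
theorem heuristic_docs_urls_py_spec : Claim_equal_heuristic_docs_urls_py := by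
  intro query _
  unfold Spec_heuristic_docs_urls_py
  rw [pvA_eq_core, pvB_eq_core, pvCore_eq]
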